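-- pv_equiv track=rewrite | github.com/sajjadriaj/teamit | models/base.py | has_two_max_rated_players
-- ===== SOURCE A (Python) =====
-- def has_two_max_rated_players(team):
--     max_rated_positions = set()
--     for ratings in team.values():
--         for position, rating in ratings.items():
--             if rating == 10:
--                 if position in max_rated_positions:
--                     return True
--                 max_rated_positions.add(position)
--     return False
-- ===== SOURCE B (Python) =====
-- def has_two_max_rated_players(team):
--     entries = [(position, rating)
--                for ratings in team.values()
--                for position, rating in ratings.items()]
--     return any(rating == 10
--                and sum(1 for q, s in entries if s == 10 and q == position) >= 2
--                for position, rating in entries)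
-- ===== Notes on version B (the rewrite author's own statement) =====
-- stated objective: alternative
-- what changed: Replaces A's incremental membership-set with early return by a brute-force counting algorithm with no set at all: flatten every (position, rating) entry, then for each max-rated entry count its position's occurrences among max-rated entries and answer whether some count reaches 2.
import Mathlib
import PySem

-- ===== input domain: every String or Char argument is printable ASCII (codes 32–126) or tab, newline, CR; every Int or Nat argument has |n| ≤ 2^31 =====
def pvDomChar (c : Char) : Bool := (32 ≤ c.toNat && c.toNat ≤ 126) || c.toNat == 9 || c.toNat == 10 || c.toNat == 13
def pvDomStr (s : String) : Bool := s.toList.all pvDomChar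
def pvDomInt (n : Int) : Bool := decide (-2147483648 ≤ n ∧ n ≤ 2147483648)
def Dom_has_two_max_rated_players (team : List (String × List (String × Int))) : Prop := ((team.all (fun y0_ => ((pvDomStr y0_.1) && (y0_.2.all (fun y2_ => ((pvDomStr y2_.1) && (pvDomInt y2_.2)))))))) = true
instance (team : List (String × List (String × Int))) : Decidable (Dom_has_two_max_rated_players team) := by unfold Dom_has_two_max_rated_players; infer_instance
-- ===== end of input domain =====

-- B replaces A's early-exit membership-set scan by a set-free brute-force counting algorithm
-- (flatten all entries, then count each max-rated position's occurrences); objective: alternative.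

-- ===== PORT A =====
-- inner 'for position, rating in ratings.items()' loop: returns (earlyReturnTrue?, updated set)
def pvAInner (s : PySem.Set String) : List (String × Int) → Bool × PySem.Set String
  | [] => (false, s)
  | (position, rating) :: rest =>
    if rating == 10 then
      if PySem.Set.contains s position then (true, s)
      else pvAInner (PySem.Set.add s position) rest
    else pvAInner s rest

-- outer 'for ratings in team.values()' loop
def pvAOuter (s : PySem.Set String) : List (String × List (String × Int)) → Bool × PySem.Set String
  | [] => (false, s)
  | (_, ratings) :: rest =>
    match pvAInner s ratings with
    | (true, s') => (true, s')
    | (false, s') => pvAOuter s' rest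

def has_two_max_rated_players (team : List (String × List (String × Int))) : Bool :=
  (pvAOuter PySem.Set.empty team).1

-- ===== PORT B =====
def has_two_max_rated_players_alt (team : List (String × List (String × Int))) : Bool :=
  let entries : List (String × Int) := team.flatMap (fun kv => kv.2)
  entries.any (fun pr =>
    pr.2 == 10 &&
    decide (2 ≤ (entries.countP (fun qr => qr.2 == 10 && qr.1 == pr.1))))

-- ===== PRECONDITION & SPEC =====
def Spec_has_two_max_rated_players (team : List (String × List (String × Int))) (out : Bool) : Prop := out = has_two_max_rated_players_alt team
instance (team : List (String × List (String × Int))) (out : Bool) : Decidable (Spec_has_two_max_rated_players team out) := by unfold Spec_has_two_max_rated_players; infer_instance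

-- ===== CLAIM (what is proved, stated in full; the proofs are below) =====
def Claim_equal_has_two_max_rated_players : Prop := ∀ (team : List (String × List (String × Int))), Dom_has_two_max_rated_players team → Spec_has_two_max_rated_players team (has_two_max_rated_players team)

-- ===== LEMMAS AND PROOFS =====

-- the duplicate scan over a bare position list that both loops of A reduce to
def pvDupScan (s : PySem.Set String) : List String → Bool × PySem.Set String
  | [] => (false, s)
  | p :: ps =>
    if PySem.Set.contains s p then (true, s) else pvDupScan (PySem.Set.add s p) ps

def pvFilt (l : List (String × Int)) : List String :=
  l.filterMap (fun pr => if pr.2 == 10 then some pr.1 else none)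

theorem pvAInner_eq (l : List (String × Int)) (s : PySem.Set String) :
    pvAInner s l = pvDupScan s (pvFilt l) := by
  induction l generalizing s with
  | nil => rfl
  | cons pr rest ih =>
    obtain ⟨p, r⟩ := pr
    by_cases hr : r = 10
    · simp only [pvAInner, pvFilt, List.filterMap_cons, hr, if_pos, beq_self_eq_true, pvDupScan]
      split
      · rfl
      · exact ih _
    · simp [pvAInner, pvFilt, hr, ih]

theorem pvDupScan_append (l₁ l₂ : List String) (s : PySem.Set String) :
    pvDupScan s (l₁ ++ l₂) =
      match pvDupScan s l₁ with
      | (true, s') => (true, s')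
      | (false, s') => pvDupScan s' l₂ := by
  induction l₁ generalizing s with
  | nil => simp [pvDupScan]
  | cons p ps ih =>
    simp only [List.cons_append, pvDupScan]
    split
    · rfl
    · exact ih _

theorem pvAOuter_eq (team : List (String × List (String × Int))) (s : PySem.Set String) :
    pvAOuter s team = pvDupScan s (team.flatMap (fun kv => pvFilt kv.2)) := by
  induction team generalizing s with
  | nil => rfl
  | cons kv rest ih =>
    simp only [pvAOuter, List.flatMap_cons, pvDupScan_append, pvAInner_eq]
    cases h : pvDupScan s (pvFilt kv.2) with
    | mk b s' => cases b <;> simp [ih]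

theorem pvAdd_of_not_mem (s : PySem.Set String) (p : String) (h : ¬ p ∈ s) :
    PySem.Set.add s p = s ++ [p] := by
  simp [PySem.Set.add, PySem.Set.contains, h]

-- A's scan reports false exactly when the accumulated set together with the remaining
-- positions is duplicate-free
theorem pvDupScan_false_iff (ps : List String) (s : PySem.Set String) (hs : s.Nodup) :
    (pvDupScan s ps).1 = false ↔ (s ++ ps).Nodup := by
  induction ps generalizing s with
  | nil => simpa [pvDupScan] using hs
  | cons p ps ih =>
    by_cases h : p ∈ s
    · rw [show pvDupScan s (p :: ps) = (true, s) from by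
        simp [pvDupScan, PySem.Set.contains, h]]
      constructor
      · intro hc; exact absurd hc (by simp)
      · intro hnd
        exfalso
        exact (List.nodup_append.mp hnd).2.2 p h p (by simp) rfl
    · have hadd : (s ++ [p]).Nodup := by
        simp only [List.nodup_append]
        refine ⟨hs, List.nodup_singleton p, ?_⟩
        intro a ha b hb
        simp only [List.mem_singleton] at hb
        subst hb
        exact fun hab => h (hab ▸ ha)
      rw [show pvDupScan s (p :: ps) = pvDupScan (PySem.Set.add s p) ps from by
        simp [pvDupScan, PySem.Set.contains, h]]
      rw [pvAdd_of_not_mem s p h, ih _ hadd, List.append_assoc, List.singleton_append]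

-- count of a position among the max-rated entries equals B's nested counting scan
theorem pvCount_eq (entries : List (String × Int)) (a : String) :
    (pvFilt entries).count a = entries.countP (fun qr => qr.2 == 10 && qr.1 == a) := by
  induction entries with
  | nil => rfl
  | cons pr rest ih =>
    obtain ⟨q, r⟩ := pr
    simp only [pvFilt, beq_iff_eq] at ih ⊢
    by_cases hr : r = 10
    · by_cases hq : q = a <;>
        simp [hr, hq, ih]
    · simp [hr, ih]

-- B answers true exactly when the max-rated position list has a duplicate
theorem pvAlt_iff (team : List (String × List (String × Int))) :
    has_two_max_rated_players_alt team = true ↔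
      ¬ (team.flatMap (fun kv => pvFilt kv.2)).Nodup := by
  unfold has_two_max_rated_players_alt
  simp only
  set entries := team.flatMap (fun kv => kv.2) with hentries
  have hflat : team.flatMap (fun kv => pvFilt kv.2) = pvFilt entries := by
    simp [pvFilt, hentries, List.filterMap_flatMap]
  rw [hflat]
  rw [List.any_eq_true]
  constructor
  · rintro ⟨pr, hmem, hpr⟩
    simp only [Bool.and_eq_true, beq_iff_eq, decide_eq_true_eq] at hpr
    obtain ⟨h10, hcnt⟩ := hpr
    rw [← pvCount_eq] at hcnt
    intro hnd
    have := List.nodup_iff_count_le_one.mp hnd pr.1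
    omega
  · intro hnd
    obtain ⟨a, ha⟩ : ∃ a, 2 ≤ (pvFilt entries).count a := by
      by_contra hc
      push Not at hc
      exact hnd (List.nodup_iff_count_le_one.mpr (fun a => by have := hc a; omega))
    have hmem : a ∈ pvFilt entries := by
      rw [← List.count_pos_iff]; omega
    have hmem' : (a, (10 : Int)) ∈ entries := by simpa [pvFilt] using hmem
    refine ⟨(a, 10), hmem', ?_⟩
    simp only [Bool.and_eq_true, beq_iff_eq, decide_eq_true_eq]
    exact ⟨trivial, by rw [← pvCount_eq]; exact ha⟩

-- ===== VERDICT (by name: the statement is the Claim_ definition above) =====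
theorem has_two_max_rated_players_spec : Claim_equal_has_two_max_rated_players := by
  intro team _
  unfold Spec_has_two_max_rated_players has_two_max_rated_players
  rw [pvAOuter_eq]
  set ps := team.flatMap (fun kv => pvFilt kv.2) with hps
  have hiff : (pvDupScan PySem.Set.empty ps).1 = false ↔ ps.Nodup := by
    simpa [PySem.Set.empty] using pvDupScan_false_iff ps PySem.Set.empty (by constructor)
  have halt := pvAlt_iff team
  rw [← hps] at halt
  cases hb : (pvDupScan PySem.Set.empty ps).1 with
  | false =>
    have hnd := hiff.mp hb
    cases hba : has_two_max_rated_players_alt team with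
    | false => rfl
    | true => exact absurd (halt.mp hba) (not_not.mpr hnd)
  | true =>
    cases hba : has_two_max_rated_players_alt team with
    | false =>
      have hnd : ps.Nodup := by
        by_contra hc
        exact absurd (halt.mpr hc) (by simp [hba])
      rw [hiff.mpr hnd] at hb; exact absurd hb (by decide)
    | true => rfl
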